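-- pv_equiv track=rewrite | github.com/nixnmtm/BakerLab | MolecularDynamics/nixMDutils.py | generate_vmd_selection_from_residues
-- ===== SOURCE A (Python) =====
-- def generate_vmd_selection_from_residues(residues) -> str:
--     """
--     Build a compact VMD selection string from residue numbers.
--
--     VMD accepts selections like:
--       - "resid 5 9 12"                  (discrete residues)
--       - "resid 5 to 9 12 20 to 25"     (ranges + discrete)
--     Multiple residues/ranges after a single 'resid' are implicitly OR'ed.
--
--     Args:
--         residues: Iterable of residue indices (ints). Duplicates are ignored.
--
--     Returns:
--         A string like "resid 5 7 to 10 42". If no residues are given,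
--         returns "none" (a valid empty selection in VMD).
--
--     Raises:
--         TypeError: if any residue cannot be interpreted as an int.
--     """
--     # Normalize & validate
--     try:
--         uniq: Set[int] = {int(r) for r in residues}
--     except (ValueError, TypeError) as e:
--         raise TypeError("All residues must be integers or castable to int.") from e
--
--     if not uniq:
--         return "none"
--
--     sorted_res = sorted(uniq)
--
--     # Collapse consecutive runs into ranges
--     ranges = []
--     start = prev = sorted_res[0]
--     for r in sorted_res[1:]:
--         if r == prev + 1:
--             prev = r
--             continue
--         # Close current run
--         ranges.append((start, prev))
--         start = prev = r
--     ranges.append((start, prev))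
--
--     # Format: single numbers as N, runs as "A to B"
--     parts = []
--     for a, b in ranges:
--         if a == b:
--             parts.append(str(a))
--         else:
--             parts.append(f"{a} to {b}")
--
--     return "resid " + " ".join(parts)
-- ===== SOURCE B (Python) =====
-- def generate_vmd_selection_from_residues(residues) -> str:
--     try:
--         uniq = {int(r) for r in residues}
--     except (ValueError, TypeError) as e:
--         raise TypeError("All residues must be integers or castable to int.") from e
--     if not uniq:
--         return "none"
--     starts = sorted(r for r in uniq if r - 1 not in uniq)
--     ends = sorted(r for r in uniq if r + 1 not in uniq)
--     parts = [str(a) if a == b else f"{a} to {b}" for a, b in zip(starts, ends)]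
--     return "resid " + " ".join(parts)
-- ===== Notes on version B (the rewrite author's own statement) =====
-- stated objective: alternative
-- what changed: Runs are detected by set membership (r is a run start iff r-1 is absent, a run end iff r+1 is absent) and the sorted starts are zipped with the sorted ends, replacing the stateful prev-tracking scan over the sorted list.
import Mathlib
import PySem

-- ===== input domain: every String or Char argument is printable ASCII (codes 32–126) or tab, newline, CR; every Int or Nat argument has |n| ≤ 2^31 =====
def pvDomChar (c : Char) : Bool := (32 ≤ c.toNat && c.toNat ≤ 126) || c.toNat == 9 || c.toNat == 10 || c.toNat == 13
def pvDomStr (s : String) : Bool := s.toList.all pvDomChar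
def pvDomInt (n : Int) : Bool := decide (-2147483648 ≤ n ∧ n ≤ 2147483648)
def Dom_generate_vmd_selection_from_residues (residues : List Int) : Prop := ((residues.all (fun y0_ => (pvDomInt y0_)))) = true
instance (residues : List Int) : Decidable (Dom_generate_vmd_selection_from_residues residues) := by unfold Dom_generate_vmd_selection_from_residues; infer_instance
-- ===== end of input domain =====

-- B detects runs by set membership (r-1/r+1 absent ⇒ run start/end) and zips sorted
-- starts with sorted ends, instead of A's stateful prev-tracking scan (alternative algorithm).

-- ===== PORT A =====
def generate_vmd_selection_from_residues (residues : List Int) : String :=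
  let uniq := PySem.Set.ofList residues        -- {int(r) for r in residues}
  if uniq = [] then "none"
  else
    let sorted_res := PySem.List.sorted uniq (fun x => x) false
    -- sorted_res[0]: guarded nonempty above, headD's default is never used
    let first := sorted_res.headD 0
    -- for r in sorted_res[1:], state (ranges, start, prev)
    let st := (PySem.List.slice sorted_res (some 1) none).foldl
      (fun (st : List (Int × Int) × Int × Int) r =>
        if r = st.2.2 + 1 then (st.1, st.2.1, r)
        else (st.1 ++ [(st.2.1, st.2.2)], r, r))
      ([], first, first)
    let ranges := st.1 ++ [(st.2.1, st.2.2)]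
    let parts := ranges.foldl
      (fun (acc : List String) ab =>
        if ab.1 = ab.2 then acc ++ [PySem.Int.toStr ab.1]
        else acc ++ [PySem.Int.toStr ab.1 ++ " to " ++ PySem.Int.toStr ab.2]) []
    "resid " ++ PySem.Str.join " " parts

-- ===== PORT B =====
def generate_vmd_selection_from_residues_alt (residues : List Int) : String :=
  let uniq := PySem.Set.ofList residues
  if uniq = [] then "none"
  else
    let starts := PySem.List.sorted (uniq.filter (fun r => !(uniq.contains (r - 1)))) (fun x => x) false
    let ends := PySem.List.sorted (uniq.filter (fun r => !(uniq.contains (r + 1)))) (fun x => x) false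
    let parts := (starts.zip ends).map
      (fun ab : Int × Int =>
        if ab.1 = ab.2 then PySem.Int.toStr ab.1
        else PySem.Int.toStr ab.1 ++ " to " ++ PySem.Int.toStr ab.2)
    "resid " ++ PySem.Str.join " " parts

-- ===== PRECONDITION & SPEC =====
def Spec_generate_vmd_selection_from_residues (residues : List Int) (out : String) : Prop := out = generate_vmd_selection_from_residues_alt residues
instance (residues : List Int) (out : String) : Decidable (Spec_generate_vmd_selection_from_residues residues out) := by unfold Spec_generate_vmd_selection_from_residues; infer_instance

-- ===== CLAIM (what is proved, stated in full; the proofs are below) =====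
def Claim_equal_generate_vmd_selection_from_residues : Prop := ∀ (residues : List Int), Dom_generate_vmd_selection_from_residues residues → Spec_generate_vmd_selection_from_residues residues (generate_vmd_selection_from_residues residues)

-- ===== LEMMAS AND PROOFS =====

-- A's range-building loop, without the accumulator.
def loopR (start prev : Int) : List Int → List (Int × Int)
  | [] => [(start, prev)]
  | r :: t => if r = prev + 1 then loopR start r t else (start, prev) :: loopR r r t

-- Maximal runs of consecutive integers, built back-to-front.
def blocks : List Int → List (List Int)
  | [] => []
  | x :: xs => match blocks xs with
    | (y :: g) :: gs => if y = x + 1 then (x :: y :: g) :: gs else [x] :: (y :: g) :: gs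
    | gs => [x] :: gs

def setFst (a : Int) : List (Int × Int) → List (Int × Int)
  | [] => []
  | p :: t => (a, p.2) :: t

lemma blocks_cons (x : Int) (xs : List Int) : blocks (x :: xs) =
    (match blocks xs with
      | (y :: g) :: gs => if y = x + 1 then (x :: y :: g) :: gs else [x] :: (y :: g) :: gs
      | gs => [x] :: gs) := rfl

lemma blocks_head (l : List Int) (a : Int) : ∃ g gs, blocks (a :: l) = (a :: g) :: gs := by
  cases l with
  | nil => exact ⟨[], [], rfl⟩
  | cons y t =>
    obtain ⟨g, gs, h⟩ := blocks_head t y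
    by_cases hy : y = a + 1
    · exact ⟨y :: g, gs, by rw [blocks_cons, h]; simp [hy]⟩
    · exact ⟨[], (y :: g) :: gs, by rw [blocks_cons, h]; simp [hy]⟩

lemma foldl_ranges (l : List Int) : ∀ (acc : List (Int × Int)) (start prev : Int),
    (let st := l.foldl
      (fun (st : List (Int × Int) × Int × Int) r =>
        if r = st.2.2 + 1 then (st.1, st.2.1, r)
        else (st.1 ++ [(st.2.1, st.2.2)], r, r)) (acc, start, prev)
     st.1 ++ [(st.2.1, st.2.2)]) = acc ++ loopR start prev l := by
  induction l with
  | nil => intro acc start prev; simp [loopR]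
  | cons r t ih =>
    intro acc start prev
    by_cases h : r = prev + 1
    · simpa [List.foldl_cons, h, loopR] using ih acc start r
    · simpa [List.foldl_cons, h, loopR] using ih (acc ++ [(start, prev)]) r r

lemma loopR_eq_blocks (l : List Int) : ∀ (start prev : Int),
    loopR start prev l = setFst start ((blocks (prev :: l)).map (fun g => (g.headD 0, g.getLastD 0))) := by
  induction l with
  | nil => intro start prev; simp [loopR, blocks, setFst]
  | cons r t ih =>
    intro start prev
    obtain ⟨g, gs, hb⟩ := blocks_head t r
    by_cases h : r = prev + 1
    · have : blocks (prev :: r :: t) = (prev :: r :: g) :: gs := by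
        rw [blocks_cons, hb]; simp [h]
      rw [loopR, if_pos h, ih start r, hb, this]
      simp [setFst]
    · have : blocks (prev :: r :: t) = [prev] :: (r :: g) :: gs := by
        rw [blocks_cons, hb]; simp [h]
      rw [loopR, if_neg h, ih r r, hb, this]
      simp [setFst]

lemma starts_eq (s : List Int) (hs : s.Pairwise (· < ·)) :
    s.filter (fun r => !(s.contains (r - 1))) = (blocks s).map (fun g => g.headD 0) := by
  induction s with
  | nil => simp [blocks]
  | cons x xs ih =>
    have hlt : ∀ y ∈ xs, x < y := (List.pairwise_cons.mp hs).1
    have hxs : xs.Pairwise (· < ·) := (List.pairwise_cons.mp hs).2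
    have hxkeep : ((x :: xs).contains (x - 1)) = false := by
      simp only [List.contains_eq_mem, decide_eq_false_iff_not, List.mem_cons]
      rintro (h | h)
      · omega
      · exact absurd (hlt _ h) (by omega)
    cases hxs' : xs with
    | nil => simp [blocks, hxkeep]
    | cons y t =>
      subst hxs'
      have hyx : x < y := hlt y (by simp)
      have hty : ∀ r ∈ t, y < r := (List.pairwise_cons.mp hxs).1
      obtain ⟨g, gs, hb⟩ := blocks_head t y
      have ihv := ih hxs
      have e0 : (x :: y :: t).filter (fun r => !((x :: y :: t).contains (r - 1)))
          = x :: (y :: t).filter (fun r => !((x :: y :: t).contains (r - 1))) := by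
        rw [List.filter_cons]; simp only [hxkeep, Bool.not_false, reduceIte]
      by_cases hy : y = x + 1
      · -- y merges with x
        have hblk : blocks (x :: y :: t) = (x :: y :: g) :: gs := by
          rw [blocks_cons, hb]; simp [hy]
        have hydropS : ((x :: y :: t).contains (y - 1)) = true := by
          simp only [List.contains_eq_mem, decide_eq_true_eq, List.mem_cons]
          exact Or.inl (by omega)
        have hykeepXS : ((y :: t).contains (y - 1)) = false := by
          simp only [List.contains_eq_mem, decide_eq_false_iff_not, List.mem_cons]
          rintro (h | h)
          · omega
          · exact absurd (hty _ h) (by omega)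
        have hcongr : ∀ r ∈ t,
            (!((x :: y :: t).contains (r - 1))) = (!((y :: t).contains (r - 1))) := by
          intro r hr
          have h1 : ¬ (r - 1 = x) := by have := hty r hr; omega
          simp only [List.contains_eq_mem, List.mem_cons]
          rw [decide_eq_decide.mpr (or_iff_right h1)]
        have e1 : (y :: t).filter (fun r => !((x :: y :: t).contains (r - 1)))
            = t.filter (fun r => !((x :: y :: t).contains (r - 1))) := by
          rw [List.filter_cons]; simp only [hydropS, Bool.not_true, Bool.false_eq_true, if_false]
        have e3 : (y :: t).filter (fun r => !((y :: t).contains (r - 1)))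
            = y :: t.filter (fun r => !((y :: t).contains (r - 1))) := by
          rw [List.filter_cons]; simp only [hykeepXS, Bool.not_false, reduceIte]
        rw [hb, e3] at ihv
        simp only [List.map_cons, List.headD_cons, List.cons.injEq] at ihv
        rw [hblk, e0, e1, List.filter_congr hcongr, ihv.2]
        simp
      · -- new block at y
        have hblk : blocks (x :: y :: t) = [x] :: (y :: g) :: gs := by
          rw [blocks_cons, hb]; simp [hy]
        have hcongr : ∀ r ∈ (y :: t),
            (!((x :: y :: t).contains (r - 1))) = (!((y :: t).contains (r - 1))) := by
          intro r hr
          have h1 : ¬ (r - 1 = x) := by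
            rcases List.mem_cons.mp hr with h | h
            · omega
            · have := hty r h; omega
          simp only [List.contains_eq_mem, List.mem_cons]
          rw [decide_eq_decide.mpr (or_iff_right h1)]
        rw [hblk, e0, List.filter_congr hcongr, ihv, hb]
        simp

lemma ends_eq (s : List Int) (hs : s.Pairwise (· < ·)) :
    s.filter (fun r => !(s.contains (r + 1))) = (blocks s).map (fun g => g.getLastD 0) := by
  induction s with
  | nil => simp [blocks]
  | cons x xs ih =>
    have hlt : ∀ y ∈ xs, x < y := (List.pairwise_cons.mp hs).1
    have hxs : xs.Pairwise (· < ·) := (List.pairwise_cons.mp hs).2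
    cases hxs' : xs with
    | nil =>
      have : (([x] : List Int).contains (x + 1)) = false := by
        simp only [List.contains_eq_mem, decide_eq_false_iff_not, List.mem_singleton]
        omega
      simp [blocks, this]
    | cons y t =>
      subst hxs'
      have hyx : x < y := hlt y (by simp)
      have hty : ∀ r ∈ t, y < r := (List.pairwise_cons.mp hxs).1
      obtain ⟨g, gs, hb⟩ := blocks_head t y
      have ihv := ih hxs
      have hcongr : ∀ r ∈ (y :: t),
          (!((x :: y :: t).contains (r + 1))) = (!((y :: t).contains (r + 1))) := by
        intro r hr
        have h1 : ¬ (r + 1 = x) := by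
          rcases List.mem_cons.mp hr with h | h
          · omega
          · have := hty r h; omega
        simp only [List.contains_eq_mem, List.mem_cons]
        rw [decide_eq_decide.mpr (or_iff_right h1)]
      by_cases hy : y = x + 1
      · -- x is not a run end, block merges
        have hblk : blocks (x :: y :: t) = (x :: y :: g) :: gs := by
          rw [blocks_cons, hb]; simp [hy]
        have hxdrop : ((x :: y :: t).contains (x + 1)) = true := by
          simp only [List.contains_eq_mem, decide_eq_true_eq, List.mem_cons]
          exact Or.inr (Or.inl (by omega))
        have e0 : (x :: y :: t).filter (fun r => !((x :: y :: t).contains (r + 1)))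
            = (y :: t).filter (fun r => !((x :: y :: t).contains (r + 1))) := by
          rw [List.filter_cons]; simp only [hxdrop, Bool.not_true, Bool.false_eq_true, if_false]
        rw [hblk, e0, List.filter_congr hcongr, ihv, hb]
        simp
      · -- x is a run end
        have hblk : blocks (x :: y :: t) = [x] :: (y :: g) :: gs := by
          rw [blocks_cons, hb]; simp [hy]
        have hxkeep : ((x :: y :: t).contains (x + 1)) = false := by
          simp only [List.contains_eq_mem, decide_eq_false_iff_not, List.mem_cons]
          rintro (h | h | h)
          · omega
          · omega
          · exact absurd (hty _ h) (by omega)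
        have e0 : (x :: y :: t).filter (fun r => !((x :: y :: t).contains (r + 1)))
            = x :: (y :: t).filter (fun r => !((x :: y :: t).contains (r + 1))) := by
          rw [List.filter_cons]; simp only [hxkeep, Bool.not_false, reduceIte]
        rw [hblk, e0, List.filter_congr hcongr, ihv, hb]
        simp

lemma foldl_parts (l : List (Int × Int)) : ∀ (acc : List String),
    l.foldl (fun (acc : List String) ab =>
        if ab.1 = ab.2 then acc ++ [PySem.Int.toStr ab.1]
        else acc ++ [PySem.Int.toStr ab.1 ++ " to " ++ PySem.Int.toStr ab.2]) acc
      = acc ++ l.map (fun ab =>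
          if ab.1 = ab.2 then PySem.Int.toStr ab.1
          else PySem.Int.toStr ab.1 ++ " to " ++ PySem.Int.toStr ab.2) := by
  induction l with
  | nil => simp
  | cons ab t ih =>
    intro acc
    by_cases h : ab.1 = ab.2 <;> simp [List.foldl_cons, h, ih]

-- ===== VERDICT (by name: the statement is the Claim_ definition above) =====
theorem generate_vmd_selection_from_residues_spec : Claim_equal_generate_vmd_selection_from_residues := by
  intro residues _
  unfold Spec_generate_vmd_selection_from_residues
  unfold generate_vmd_selection_from_residues generate_vmd_selection_from_residues_alt
  set uniq := PySem.Set.ofList residues with huniq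
  by_cases hu : uniq = []
  · simp [hu]
  · simp only [hu, if_false]
    set s := PySem.List.sorted uniq (fun x => x) false with hsdef
    have hpair : s.Pairwise (· < ·) := by
      rw [hsdef, huniq]; exact PySem.List.sorted_ofList_pairwise_lt residues
    have hsne : s ≠ [] := by
      rw [hsdef]; simpa [PySem.List.sorted_eq_nil_iff] using hu
    obtain ⟨h, t, hst⟩ := List.exists_cons_of_ne_nil hsne
    -- B's sorted filters are filters of s
    have hperm : s.Perm uniq := by rw [hsdef]; exact PySem.List.sorted_perm uniq (fun x => x) false
    have hmemeq : ∀ z : Int, uniq.contains z = s.contains z := by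
      intro z
      simp only [PySem.Set.contains]
      rw [List.contains_eq_mem, List.contains_eq_mem]
      exact decide_eq_decide.mpr hperm.mem_iff.symm
    have hfsort : ∀ p : Int → Bool,
        PySem.List.sorted (uniq.filter p) (fun x => x) false = s.filter p := by
      intro p
      exact PySem.List.sorted_eq_of_perm_of_pairwise_lt (uniq.filter p) (s.filter p)
        (fun x => x) (hperm.filter p) (hpair.filter p)
    have hstarts : PySem.List.sorted (uniq.filter (fun r => !(uniq.contains (r - 1)))) (fun x => x) false
        = (blocks s).map (fun g => g.headD 0) := by
      rw [hfsort, List.filter_congr (fun r _ => by rw [hmemeq]), starts_eq s hpair]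
    have hends : PySem.List.sorted (uniq.filter (fun r => !(uniq.contains (r + 1)))) (fun x => x) false
        = (blocks s).map (fun g => g.getLastD 0) := by
      rw [hfsort, List.filter_congr (fun r _ => by rw [hmemeq]), ends_eq s hpair]
    -- A's ranges equal B's zipped starts/ends
    have hslice : PySem.List.slice s (some 1) none = t := by
      rw [hst]; simp [PySem.List.slice_from_one]
    have hhead : s.headD 0 = h := by rw [hst]; rfl
    have hranges : ∀ (st : List (Int × Int) × Int × Int),
        st = t.foldl (fun (st : List (Int × Int) × Int × Int) r =>
          if r = st.2.2 + 1 then (st.1, st.2.1, r)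
          else (st.1 ++ [(st.2.1, st.2.2)], r, r)) ([], h, h) →
        st.1 ++ [(st.2.1, st.2.2)] = loopR h h t := by
      intro st hstdef
      have := foldl_ranges t [] h h
      simp only [← hstdef] at this
      simpa using this
    have hzip : ((blocks s).map (fun g => g.headD 0)).zip ((blocks s).map (fun g => g.getLastD 0))
        = (blocks s).map (fun g => (g.headD 0, g.getLastD 0)) := List.zip_map'
    have hloop : loopR h h t = (blocks s).map (fun g => (g.headD 0, g.getLastD 0)) := by
      rw [loopR_eq_blocks t h h, ← hst]
      obtain ⟨g, gs, hb⟩ := blocks_head t h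
      rw [hst, hb]
      simp [setFst]
    -- assemble
    rw [hstarts, hends, hzip, hslice, hhead]
    rw [hranges _ rfl, hloop, foldl_parts]
    simp
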